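-- pv_equiv track=rewrite | github.com/rangat/whAnalysis | helper.py | rel_clause_seq
-- ===== SOURCE A (Python) =====
-- def rel_clause_seq(start_wh:list, rel_clause) -> bool:
--     hit_v = False
--     hit_rel = False
--
--     for word, pos in start_wh:
--         if 'V' in pos:
--             hit_v = True
--         elif hit_v and pos in rel_clause:
--             hit_rel = True
--
--     if hit_v and hit_rel:
--         return True
--
--     return False
-- ===== SOURCE B (Python) =====
-- def rel_clause_seq(start_wh: list, rel_clause) -> bool:
--     # staged index computation: compare the position of the first verb tag
--     # with the position of the last rel-clause (non-verb) tag
--     poses = [pos for _, pos in start_wh]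
--     verb_idxs = [i for i, p in enumerate(poses) if 'V' in p]
--     rel_idxs = [i for i, p in enumerate(poses) if 'V' not in p and p in rel_clause]
--     return bool(verb_idxs) and bool(rel_idxs) and verb_idxs[0] < rel_idxs[-1]
-- ===== Notes on version B (the rewrite author's own statement) =====
-- stated objective: alternative
-- what changed: Replaces the two-flag accumulator scan with a staged index computation: collect the positions of verb tags and of rel-clause non-verb tags separately and compare the first verb index with the last rel-clause index.
import Mathlib
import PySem

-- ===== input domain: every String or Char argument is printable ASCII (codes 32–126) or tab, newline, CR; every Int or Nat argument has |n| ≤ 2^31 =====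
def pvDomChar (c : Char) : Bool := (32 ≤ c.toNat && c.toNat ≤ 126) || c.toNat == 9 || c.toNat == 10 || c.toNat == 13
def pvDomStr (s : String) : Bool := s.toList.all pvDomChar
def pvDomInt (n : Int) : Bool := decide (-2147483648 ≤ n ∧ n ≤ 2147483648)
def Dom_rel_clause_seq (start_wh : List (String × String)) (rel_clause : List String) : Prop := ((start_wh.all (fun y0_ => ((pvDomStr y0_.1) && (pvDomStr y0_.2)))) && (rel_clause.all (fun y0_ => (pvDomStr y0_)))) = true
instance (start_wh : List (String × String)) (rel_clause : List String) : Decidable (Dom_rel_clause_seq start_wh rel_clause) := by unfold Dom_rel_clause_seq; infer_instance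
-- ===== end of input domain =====

-- B compares the index of the first verb tag with the index of the last rel-clause non-verb tag (staged index computation) instead of A's two-flag accumulator scan; objective: alternative.


-- ===== PORT A =====
-- the loop body: hit_v / hit_rel flags, branches in A's order
def relSeqStep (rel_clause : List String) (s : Bool × Bool) (wp : String × String) : Bool × Bool :=
  if PySem.Str.isIn "V" wp.2 then (true, s.2)
  else if s.1 && rel_clause.contains wp.2 then (s.1, true)
  else s

def rel_clause_seq (start_wh : List (String × String)) (rel_clause : List String) : Bool :=
  let st := start_wh.foldl (relSeqStep rel_clause) (false, false)
  st.1 && st.2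

-- ===== PORT B =====
-- the '[i for i, p in enumerate(poses) if pred p]' comprehension, index carried explicitly
def relIdxsWhere (p : String → Bool) : List String → Nat → List Nat
  | [], _ => []
  | x :: xs, i => if p x then i :: relIdxsWhere p xs (i + 1) else relIdxsWhere p xs (i + 1)

def rel_clause_seq_alt (start_wh : List (String × String)) (rel_clause : List String) : Bool :=
  let poses := start_wh.map (·.2)
  let verb_idxs := relIdxsWhere (fun s => PySem.Str.isIn "V" s) poses 0
  let rel_idxs := relIdxsWhere (fun s => !(PySem.Str.isIn "V" s) && rel_clause.contains s) poses 0
  match verb_idxs.head?, rel_idxs.getLast? with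
  | some i, some j => decide (i < j)
  | _, _ => false

-- ===== PRECONDITION & SPEC =====
def Spec_rel_clause_seq (start_wh : List (String × String)) (rel_clause : List String) (out : Bool) : Prop := out = rel_clause_seq_alt start_wh rel_clause
instance (start_wh : List (String × String)) (rel_clause : List String) (out : Bool) : Decidable (Spec_rel_clause_seq start_wh rel_clause out) := by unfold Spec_rel_clause_seq; infer_instance

-- ===== CLAIM (what is proved, stated in full; the proofs are below) =====
def Claim_equal_rel_clause_seq : Prop := ∀ (start_wh : List (String × String)) (rel_clause : List String), Dom_rel_clause_seq start_wh rel_clause → Spec_rel_clause_seq start_wh rel_clause (rel_clause_seq start_wh rel_clause)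

-- ===== LEMMAS AND PROOFS =====
-- index-base shift and emptiness of the index comprehension; flipping the conjunction under any
lemma relIdxsWhere_shift (p : String → Bool) (l : List String) (i : Nat) :
    relIdxsWhere p l i = (relIdxsWhere p l 0).map (· + i) := by
  induction l generalizing i with
  | nil => simp [relIdxsWhere]
  | cons x xs ih =>
    simp only [relIdxsWhere]
    rw [ih (i + 1), ih 1]
    by_cases hx : p x
    · simp only [hx, if_true, List.map_cons, List.map_map, Nat.zero_add]
      refine List.cons_eq_cons.mpr ⟨rfl, ?_⟩
      exact List.map_congr_left (fun a _ => by simp; omega)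
    · simp only [hx, Bool.false_eq_true, if_false, List.map_map]
      exact List.map_congr_left (fun a _ => by simp; omega)

lemma relAny_flip (rc : List String) (rest : List (String × String)) :
    ((rest.map (·.2)).any (fun s => !(PySem.Str.isIn "V" s) && rc.contains s))
      = rest.any (fun q => rc.contains q.2 && !(PySem.Str.isIn "V" q.2)) := by
  induction rest with
  | nil => rfl
  | cons a t ih =>
    simp only [List.map_cons, List.any_cons]
    rw [Bool.and_comm, ih]

lemma relIdxsWhere_nil_iff (p : String → Bool) (l : List String) (i : Nat) :
    relIdxsWhere p l i = [] ↔ l.any p = false := by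
  induction l generalizing i with
  | nil => simp [relIdxsWhere]
  | cons x xs ih => by_cases hx : p x <;> simp [relIdxsWhere, hx, ih]

def relG (rel_clause : List String) : List (String × String) → Bool
  | [] => false
  | wp :: rest =>
      if PySem.Str.isIn "V" wp.2 then
        rest.any (fun q => rel_clause.contains q.2 && !(PySem.Str.isIn "V" q.2))
      else relG rel_clause rest

def relAltPoses (rel_clause : List String) (poses : List String) : Bool :=
  match (relIdxsWhere (fun s => PySem.Str.isIn "V" s) poses 0).head?,
        (relIdxsWhere (fun s => !(PySem.Str.isIn "V" s) && rel_clause.contains s) poses 0).getLast? with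
  | some i, some j => decide (i < j)
  | _, _ => false

lemma relB_eq_relG (rel_clause : List String) (sw : List (String × String)) :
    relAltPoses rel_clause (sw.map (·.2)) = relG rel_clause sw := by
  induction sw with
  | nil => rfl
  | cons wp rest ih =>
    simp only [List.map_cons, relG]
    simp only [relAltPoses, relIdxsWhere] at *
    rw [relIdxsWhere_shift _ (rest.map (·.2)) 1,
        relIdxsWhere_shift (fun s => !(PySem.Str.isIn "V" s) && rel_clause.contains s)
          (rest.map (·.2)) 1] at *
    set V0 := relIdxsWhere (fun s => PySem.Str.isIn "V" s) (rest.map (·.2)) 0 with hV0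
    set R0 := relIdxsWhere (fun s => !(PySem.Str.isIn "V" s) && rel_clause.contains s)
        (rest.map (·.2)) 0 with hR0
    have hanyR : (R0 = []) ↔
        rest.any (fun q => rel_clause.contains q.2 && !(PySem.Str.isIn "V" q.2)) = false := by
      rw [hR0, relIdxsWhere_nil_iff, relAny_flip]
    by_cases hv : PySem.Str.isIn "V" wp.2
    · simp only [hv, Bool.not_true, Bool.false_and, Bool.false_eq_true, if_false, if_true,
        List.head?_cons]
      rw [List.getLast?_map]
      cases hL : R0.getLast? with
      | none =>
        have h0 := hanyR.mp (List.getLast?_eq_none_iff.mp hL)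
        rw [h0]; rfl
      | some j =>
        have hne : R0 ≠ [] := by intro h; rw [h] at hL; simp at hL
        have hT : rest.any (fun q => rel_clause.contains q.2 && !(PySem.Str.isIn "V" q.2)) = true := by
          cases h : rest.any (fun q => rel_clause.contains q.2 && !(PySem.Str.isIn "V" q.2)) with
          | true => rfl
          | false => exact absurd (hanyR.mpr h) hne
        rw [hT]; rfl
    · rw [Bool.not_eq_true] at hv
      simp only [hv, Bool.not_false, Bool.true_and, Bool.false_eq_true, if_false]
      rw [← ih]
      cases hVh : V0.head? with
      | none =>
        rw [List.head?_eq_none_iff] at hVh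
        rw [hVh]
        by_cases hc : rel_clause.contains wp.2 <;> simp
      | some i =>
        obtain ⟨is, hVcons⟩ : ∃ is, V0 = i :: is := by
          cases hVv : V0 with
          | nil => rw [hVv] at hVh; simp at hVh
          | cons a as =>
            rw [hVv] at hVh
            simp only [List.head?_cons, Option.some.injEq] at hVh
            exact ⟨as, by rw [hVh]⟩
        rw [hVcons]
        by_cases hc : rel_clause.contains wp.2
        · simp only [hc, if_true, List.map_cons, List.head?_cons]
          rw [List.getLast?_cons]
          cases hL : R0.getLast? with
          | none =>
            rw [List.getLast?_eq_none_iff] at hL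
            rw [hL]
            simp
          | some j =>
            rw [List.getLast?_map, hL]
            simp
        · simp only [hc, Bool.false_eq_true, if_false, List.map_cons, List.head?_cons]
          rw [List.getLast?_map]
          cases hL : R0.getLast? with
          | none => simp
          | some j => simp

-- once hit_v is true it stays true, and hit_rel accumulates "pos in rel_clause and not a verb"
lemma relSeq_foldl_true (rel_clause : List String) (sw : List (String × String)) (hr : Bool) :
    sw.foldl (relSeqStep rel_clause) (true, hr)
      = (true, hr || sw.any (fun q => rel_clause.contains q.2 && !(PySem.Str.isIn "V" q.2))) := by
  induction sw generalizing hr with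
  | nil => simp
  | cons wp rest ih =>
    simp only [List.foldl_cons, List.any_cons, relSeqStep]
    by_cases hv : PySem.Chars.isIn ['V'] wp.2.toList
    · simp [PySem.Str.isIn, hv, ih]
    · by_cases hc : wp.2 ∈ rel_clause <;>
        simp [PySem.Str.isIn, hv, hc, ih]

lemma relA_eq_relG (rel_clause : List String) (sw : List (String × String)) :
    rel_clause_seq sw rel_clause = relG rel_clause sw := by
  induction sw with
  | nil => rfl
  | cons wp rest ih =>
    simp only [rel_clause_seq, List.foldl_cons, relSeqStep, relG] at *
    by_cases hv : PySem.Chars.isIn ['V'] wp.2.toList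
    · simp [PySem.Str.isIn, hv, relSeq_foldl_true]
    · simpa [PySem.Str.isIn, hv] using ih

-- ===== VERDICT (by name: the statement is the Claim_ definition above) =====
theorem rel_clause_seq_spec : Claim_equal_rel_clause_seq := by
  intro sw rc _
  show rel_clause_seq sw rc = rel_clause_seq_alt sw rc
  have hB : rel_clause_seq_alt sw rc = relAltPoses rc (sw.map (·.2)) := rfl
  rw [hB, relB_eq_relG, relA_eq_relG]
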